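-- pv_equiv track=rewrite | github.com/frostodev/InfoVault | 04 - INF-253 Lenguajes de Programación [2024-1]/Tarea1-LP/red.py | verificarDigitoVerificador
-- ===== SOURCE A (Python) =====
-- def verificarDigitoVerificador(rut):
--     '''
--     ***
--     rut: string
--     ***
--     Retorna un string que corresponde al dígito verificador.
--     ***
--     Función que calcula el dígito verificador a partir de un rut.
--     '''
--
--     # Extraer el número del RUT sin el dígito verificador
--     numero_rut = rut[:-2]
--
--     # Contador inicializado en 2 para multiplicar los números del RUT
--     contador = 2
--
--     # Inicializar la suma en 0
--     suma = 0
--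
--     # Lista para almacenar los números del RUT en orden invertido
--     reves = []
--
--     # Invertir los dígitos del RUT y almacenarlos en la lista 'reves'
--     for numero in numero_rut:
--         reves.insert(0, numero)
--
--     # Iterar sobre los números invertidos del RUT
--     for numero in reves:
--         numero = int(numero)  # Convertir el número a entero
--         if contador == 8:  # Si el contador llega a 8, se reinicia a 2
--             contador = 2
--         suma += (numero * contador)  # Sumar el resultado de la multiplicación al total
--         contador += 1  # Incrementar el contador
--
--     # Calcular el dígito verificador
--     digito_verificador = suma % 11
--     digito_verificador = 11 - digito_verificador
--     if digito_verificador == 11:  # Si el resultado es 11, el dígito verificador es 0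
--         digito_verificador = 0
--     elif digito_verificador == 10:  # Si el resultado es 10, el dígito verificador es 'k'
--         digito_verificador = 'k'
--
--     # Retornar el dígito verificador como un string
--     return str(digito_verificador)
-- ===== SOURCE B (Python) =====
-- def verificarDigitoVerificador(rut):
--     # Single forward pass: the digit at index i (distance L-1-i from the right)
--     # carries weight 2 + (L-1-i) % 6, reproducing the 2..7 cycle without
--     # building a reversed list or resetting a counter.
--     numero_rut = rut[:-2]
--     L = len(numero_rut)
--     suma = 0
--     for i, ch in enumerate(numero_rut):
--         suma += int(ch) * (2 + (L - 1 - i) % 6)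
--     d = 11 - suma % 11
--     if d == 11:
--         return '0'
--     if d == 10:
--         return 'k'
--     return str(d)
-- ===== Notes on version B (the rewrite author's own statement) =====
-- stated objective: simpler
-- what changed: Replaces the reversed-list build plus the resetting counter with one forward pass where the digit at index i gets the closed-form weight 2 + (L-1-i) % 6.
import Mathlib
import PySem

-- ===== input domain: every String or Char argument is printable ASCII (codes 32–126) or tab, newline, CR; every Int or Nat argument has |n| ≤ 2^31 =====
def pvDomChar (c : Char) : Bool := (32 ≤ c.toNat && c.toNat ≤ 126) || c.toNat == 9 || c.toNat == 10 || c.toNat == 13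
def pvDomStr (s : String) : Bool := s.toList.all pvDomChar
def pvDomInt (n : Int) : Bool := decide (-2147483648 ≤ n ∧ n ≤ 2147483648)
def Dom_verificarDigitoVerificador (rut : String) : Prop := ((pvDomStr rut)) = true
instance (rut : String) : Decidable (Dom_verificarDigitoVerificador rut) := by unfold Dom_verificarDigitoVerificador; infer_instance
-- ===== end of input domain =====

-- B drops A's reversed-list build and resetting counter: one forward pass with
-- the closed-form weight 2 + (L-1-i) % 6 per digit (objective: simpler).

-- shared primitive: Python's int(ch) on a one-character string (both Pythons call it)
def pvDigitInt (c : Char) : Int := (PySem.Int.ofChars? [c]).getD 0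

-- ===== PORT A =====
def verificarDigitoVerificador (rut : String) : String :=
  let numero_rut := PySem.List.slice rut.toList none (some (-2))
  let reves := numero_rut.foldl (fun acc numero => PySem.List.insert acc 0 numero) ([] : List Char)
  let st := reves.foldl (fun (st : Int × Int) numero =>
      let n := pvDigitInt numero
      let contador := if st.1 = 8 then 2 else st.1
      (contador + 1, st.2 + n * contador)) ((2 : Int), (0 : Int))
  let d := 11 - PySem.Int.mod st.2 11
  if d = 11 then "0" else if d = 10 then "k" else PySem.Int.toStr d

-- ===== PORT B =====
def verificarDigitoVerificador_alt (rut : String) : String :=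
  let numero_rut := PySem.List.slice rut.toList none (some (-2))
  let L : Int := numero_rut.length
  let suma := (PySem.List.enumerate numero_rut 0).foldl
      (fun (s : Int) p => s + pvDigitInt p.2 * (2 + PySem.Int.mod (L - 1 - p.1) 6)) 0
  let d := 11 - PySem.Int.mod suma 11
  if d = 11 then "0" else if d = 10 then "k" else PySem.Int.toStr d

-- ===== PRECONDITION & SPEC =====
-- Pre_ excludes exactly the inputs where int() raises ValueError: some character
-- of rut[:-2] is not a decimal digit.
def Pre_verificarDigitoVerificador (rut : String) : Prop :=
  (PySem.List.slice rut.toList none (some (-2))).all (fun c => PySem.Chars.isdigit c) = true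
instance (rut : String) : Decidable (Pre_verificarDigitoVerificador rut) := by
  unfold Pre_verificarDigitoVerificador; infer_instance
def pvWitness_verificarDigitoVerificador : String := "12345-7"
def Spec_verificarDigitoVerificador (rut : String) (out : String) : Prop := out = verificarDigitoVerificador_alt rut
instance (rut : String) (out : String) : Decidable (Spec_verificarDigitoVerificador rut out) := by unfold Spec_verificarDigitoVerificador; infer_instance

-- ===== CLAIM (what is proved, stated in full; the proofs are below) =====
def Claim_equal_verificarDigitoVerificador : Prop := ∀ (rut : String), Dom_verificarDigitoVerificador rut → Pre_verificarDigitoVerificador rut → Spec_verificarDigitoVerificador rut (verificarDigitoVerificador rut)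

-- ===== LEMMAS AND PROOFS =====

-- weighted sum with the 2..7 cycle, phase k, over a char list
def pvSumW (ds : List Char) (k : Nat) : Int :=
  match ds with
  | [] => 0
  | c :: t => pvDigitInt c * (2 + ((k % 6 : Nat) : Int)) + pvSumW t (k + 1)

-- forward sum with the closed-form weight 2 + (L-1-j) % 6, indices from j
def pvSumG (ds : List Char) (L : Int) (j : Int) : Int :=
  match ds with
  | [] => 0
  | c :: t => pvDigitInt c * (2 + PySem.Int.mod (L - 1 - j) 6) + pvSumG t L (j + 1)

lemma pvSumG_shift (ds : List Char) (L : Int) (j : Int) :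
    pvSumG ds L (j + 1) = pvSumG ds (L - 1) j := by
  induction ds generalizing j with
  | nil => rfl
  | cons c t ih =>
    simp only [pvSumG, ih]
    have h : L - 1 - (j + 1) = L - 1 - 1 - j := by ring
    rw [h]

lemma pvSumW_append (xs : List Char) (c : Char) (k : Nat) :
    pvSumW (xs ++ [c]) k = pvSumW xs k + pvDigitInt c * (2 + (((k + xs.length) % 6 : Nat) : Int)) := by
  induction xs generalizing k with
  | nil => simp [pvSumW]
  | cons x t ih =>
    simp only [List.cons_append, pvSumW, ih, List.length_cons]
    have : k + 1 + t.length = k + (t.length + 1) := by omega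
    rw [this]; ring

-- A's reversed-list build is List.reverse
lemma pvReves_eq (ds : List Char) (acc : List Char) :
    ds.foldl (fun acc numero => PySem.List.insert acc 0 numero) acc = ds.reverse ++ acc := by
  induction ds generalizing acc with
  | nil => simp
  | cons c t ih =>
    rw [List.foldl_cons, PySem.List.insert_zero, ih]
    simp

-- A's loop: state invariant contador = 2 + k%6, with 8 standing for phase 0
lemma pvFoldA_eq (ds : List Char) (c s : Int) (k : Nat)
    (hc : c = 2 + ((k % 6 : Nat) : Int) ∨ (c = 8 ∧ k % 6 = 0)) :
    (ds.foldl (fun (st : Int × Int) numero =>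
        let n := pvDigitInt numero
        let contador := if st.1 = 8 then 2 else st.1
        (contador + 1, st.2 + n * contador)) (c, s)).2 = s + pvSumW ds k := by
  induction ds generalizing c s k with
  | nil => simp [pvSumW]
  | cons d t ih =>
    have hk6 : k % 6 < 6 := Nat.mod_lt _ (by omega)
    have hw : (if c = 8 then 2 else c) = 2 + ((k % 6 : Nat) : Int) := by
      rcases hc with h | ⟨h8, h0⟩
      · have hne : c ≠ 8 := by rw [h]; intro hcontra; omega
        rw [if_neg hne, h]
      · simp [h8, h0]
    have hnext : (2 + ((k % 6 : Nat) : Int)) + 1 = 2 + (((k + 1) % 6 : Nat) : Int)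
        ∨ ((2 + ((k % 6 : Nat) : Int)) + 1 = 8 ∧ (k + 1) % 6 = 0) := by
      by_cases h5 : k % 6 = 5
      · right; constructor
        · rw [h5]; norm_num
        · omega
      · left
        have : (k + 1) % 6 = k % 6 + 1 := by omega
        rw [this]; push_cast; ring
    simp only [List.foldl_cons, hw]
    rw [ih _ _ (k + 1) hnext]
    simp [pvSumW]; ring

-- B's loop: fold over enumerate is pvSumG
lemma pvFoldB_eq (ds : List Char) (L : Int) (j : Int) (s : Int) :
    ((PySem.List.enumerate ds j).foldl
        (fun (s : Int) p => s + pvDigitInt p.2 * (2 + PySem.Int.mod (L - 1 - p.1) 6)) s)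
      = s + pvSumG ds L j := by
  induction ds generalizing j s with
  | nil => simp [PySem.List.enumerate_nil, pvSumG]
  | cons c t ih =>
    rw [PySem.List.enumerate_cons, List.foldl_cons, ih]
    simp only [pvSumG]
    ring

-- forward closed-form weights equal the reversed 2..7 cycle sum
lemma pvForward_eq_rev (ds : List Char) :
    pvSumG ds (ds.length : Int) 0 = pvSumW ds.reverse 0 := by
  induction ds with
  | nil => rfl
  | cons c t ih =>
    simp only [pvSumG, List.reverse_cons, pvSumW_append, List.length_reverse, List.length_cons]
    have h1 : ((t.length + 1 : Nat) : Int) = (t.length : Int) + 1 := by push_cast; ring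
    have hsh : pvSumG t ((t.length + 1 : Nat) : Int) (0 + 1) = pvSumG t (t.length : Int) 0 := by
      rw [pvSumG_shift, h1]; ring_nf
    have hw : PySem.Int.mod (((t.length + 1 : Nat) : Int) - 1 - 0) 6 = ((t.length % 6 : Nat) : Int) := by
      rw [h1]
      have h2 : (t.length : Int) + 1 - 1 - 0 = (t.length : Int) := by ring
      rw [h2]
      exact_mod_cast PySem.Int.mod_natCast t.length 6
    rw [hsh, hw, ih]
    simp
    ring

-- ===== VERDICT (by name: the statement is the Claim_ definition above) =====
theorem verificarDigitoVerificador_spec : Claim_equal_verificarDigitoVerificador := by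
  intro rut _ _
  unfold Spec_verificarDigitoVerificador verificarDigitoVerificador verificarDigitoVerificador_alt
  simp only []
  set ds := PySem.List.slice rut.toList none (some (-2)) with hds
  rw [pvReves_eq ds [], List.append_nil]
  rw [pvFoldA_eq ds.reverse 2 0 0 (by norm_num)]
  rw [pvFoldB_eq ds (ds.length : Int) 0 0]
  rw [pvForward_eq_rev ds]
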